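-- pv_equiv track=rewrite | github.com/Yookio-Z/AFSIM_MCP | core/generation.py | select_target_for_package
-- ===== SOURCE A (Python) =====
-- def select_target_for_package(package, objectives, preferred_side):
--     priorities = list(package.get("target_priority") or [])
--     preferred = [item for item in objectives if item.get("side") == preferred_side]
--     candidates = preferred or list(objectives)
--     if not candidates:
--         return None
--
--     def score(item):
--         value = 0
--         category = str(item.get("category") or "").lower()
--         role = str(item.get("role") or "").lower()
--         name = str(item.get("name") or "").lower()
--         for index, token in enumerate(priorities):
--             weight = max(1, len(priorities) - index)
--             if token == "objective" and category in ("objective", "target"):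
--                 value += 10 * weight
--             elif token == "high_value_asset" and category == "high_value_asset":
--                 value += 10 * weight
--             elif token == "corridor_opener" and ("escort" in role or "support" in role or "hvaa" in name):
--                 value += 10 * weight
--             elif token == "fighter" and ("fighter" in name or role in ("escort", "defense", "intercept", "barrier")):
--                 value += 8 * weight
--             elif token == "survival_preserve" and category in ("objective", "target", "high_value_asset"):
--                 value += 4 * weight
--         return value
--
--     candidates.sort(key=score, reverse=True)
--     return candidates[0]
-- ===== SOURCE B (Python) =====
-- def _score_rec(tokens, weight, category, role, name):
--     if not tokens:
--         return 0
--     token = tokens[0]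
--     if token == "objective" and category in ("objective", "target"):
--         c = 10 * weight
--     elif token == "high_value_asset" and category == "high_value_asset":
--         c = 10 * weight
--     elif token == "corridor_opener" and ("escort" in role or "support" in role or "hvaa" in name):
--         c = 10 * weight
--     elif token == "fighter" and ("fighter" in name or role in ("escort", "defense", "intercept", "barrier")):
--         c = 8 * weight
--     elif token == "survival_preserve" and category in ("objective", "target", "high_value_asset"):
--         c = 4 * weight
--     else:
--         c = 0
--     return c + _score_rec(tokens[1:], max(1, weight - 1), category, role, name)
--
--
-- def select_target_for_package(package, objectives, preferred_side):
--     priorities = list(package.get("target_priority") or [])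
--
--     def score(item):
--         return _score_rec(
--             priorities,
--             len(priorities),
--             str(item.get("category") or "").lower(),
--             str(item.get("role") or "").lower(),
--             str(item.get("name") or "").lower(),
--         )
--
--     best_pref = None  # (item, score) of first best preferred-side objective
--     best_any = None   # (item, score) of first best objective overall
--     for item in objectives:
--         s = score(item)
--         if best_any is None or s > best_any[1]:
--             best_any = (item, s)
--         if item.get("side") == preferred_side and (best_pref is None or s > best_pref[1]):
--             best_pref = (item, s)
--     if best_pref is not None:
--         return best_pref[0]
--     if best_any is not None:
--         return best_any[0]
--     return None
-- ===== Notes on version B (the rewrite author's own statement) =====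
-- stated objective: alternative
-- what changed: Replaces the filter pass plus full stable descending sort with one fused pass over objectives that maintains two running first-maxima (best preferred-side item and best overall item), and replaces the enumerate-based score loop with a recursion carrying the decreasing weight as an accumulator.
import Mathlib
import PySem

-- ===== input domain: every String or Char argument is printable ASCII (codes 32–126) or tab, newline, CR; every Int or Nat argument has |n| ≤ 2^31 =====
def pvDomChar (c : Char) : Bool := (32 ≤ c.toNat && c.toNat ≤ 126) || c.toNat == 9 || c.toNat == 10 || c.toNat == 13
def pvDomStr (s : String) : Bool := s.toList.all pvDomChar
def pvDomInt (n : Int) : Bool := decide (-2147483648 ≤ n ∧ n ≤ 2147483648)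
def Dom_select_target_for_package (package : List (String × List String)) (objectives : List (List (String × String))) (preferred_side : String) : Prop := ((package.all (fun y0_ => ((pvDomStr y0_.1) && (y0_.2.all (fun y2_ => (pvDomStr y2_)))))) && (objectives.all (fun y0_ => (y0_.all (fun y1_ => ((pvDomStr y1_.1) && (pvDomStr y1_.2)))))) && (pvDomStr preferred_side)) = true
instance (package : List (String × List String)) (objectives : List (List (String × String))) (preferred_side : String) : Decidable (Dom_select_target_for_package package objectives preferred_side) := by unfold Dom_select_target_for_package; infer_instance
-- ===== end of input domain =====

-- B replaces A's filter pass + stable descending sort + [0] with ONE fused pass over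
-- objectives keeping two running first-maxima (best preferred-side item, best overall item),
-- and replaces the enumerate-based score loop with a recursion carrying the weight down.

-- ===== PORT A =====
-- A's nested `score`: fold over enumerate(priorities) with weight = max(1, len - index)
def pvScoreA (item : List (String × String)) (priorities : List String) : Int :=
  let category := PySem.Str.lower (((PySem.Dict.mk item).get? "category").getD "")
  let role := PySem.Str.lower (((PySem.Dict.mk item).get? "role").getD "")
  let name := PySem.Str.lower (((PySem.Dict.mk item).get? "name").getD "")
  (PySem.List.enumerate priorities).foldl (fun value p =>
    let index := p.1
    let token := p.2
    let weight : Int := max 1 ((priorities.length : Int) - index)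
    if token == "objective" && (category == "objective" || category == "target") then
      value + 10 * weight
    else if token == "high_value_asset" && category == "high_value_asset" then
      value + 10 * weight
    else if token == "corridor_opener" && (PySem.Str.isIn "escort" role || PySem.Str.isIn "support" role || PySem.Str.isIn "hvaa" name) then
      value + 10 * weight
    else if token == "fighter" && (PySem.Str.isIn "fighter" name || (role == "escort" || role == "defense" || role == "intercept" || role == "barrier")) then
      value + 8 * weight
    else if token == "survival_preserve" && (category == "objective" || category == "target" || category == "high_value_asset") then
      value + 4 * weight
    else value) 0

def select_target_for_package (package : List (String × List String)) (objectives : List (List (String × String))) (preferred_side : String) : Option (List (String × String)) :=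
  let priorities := ((PySem.Dict.mk package).get? "target_priority").getD []
  let preferred := objectives.filter (fun item => (PySem.Dict.mk item).get? "side" == some preferred_side)
  let candidates := if preferred = [] then objectives else preferred
  if candidates = [] then none
  else PySem.List.pyGet? (PySem.List.sorted candidates (fun item => pvScoreA item priorities) true) 0

-- ===== PORT B =====
-- B's `_score_rec`: structural recursion, the weight is an accumulator floored at 1
def pvScoreRec (tokens : List String) (weight : Int) (category role name : String) : Int :=
  match tokens with
  | [] => 0
  | token :: rest =>
    let c : Int :=
      if token == "objective" && (category == "objective" || category == "target") then 10 * weight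
      else if token == "high_value_asset" && category == "high_value_asset" then 10 * weight
      else if token == "corridor_opener" && (PySem.Str.isIn "escort" role || PySem.Str.isIn "support" role || PySem.Str.isIn "hvaa" name) then 10 * weight
      else if token == "fighter" && (PySem.Str.isIn "fighter" name || (role == "escort" || role == "defense" || role == "intercept" || role == "barrier")) then 8 * weight
      else if token == "survival_preserve" && (category == "objective" || category == "target" || category == "high_value_asset") then 4 * weight
      else 0
    c + pvScoreRec rest (max 1 (weight - 1)) category role name

def select_target_for_package_alt (package : List (String × List String)) (objectives : List (List (String × String))) (preferred_side : String) : Option (List (String × String)) :=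
  let priorities := ((PySem.Dict.mk package).get? "target_priority").getD []
  let score := fun (item : List (String × String)) =>
    pvScoreRec priorities (priorities.length : Int)
      (PySem.Str.lower (((PySem.Dict.mk item).get? "category").getD ""))
      (PySem.Str.lower (((PySem.Dict.mk item).get? "role").getD ""))
      (PySem.Str.lower (((PySem.Dict.mk item).get? "name").getD ""))
  let best := objectives.foldl
    (fun (st : Option (List (String × String) × Int) × Option (List (String × String) × Int)) item =>
      let s := score item
      let ba := match st.2 with
        | none => some (item, s)
        | some (m, ms) => if ms < s then some (item, s) else some (m, ms)
      let bp := if (PySem.Dict.mk item).get? "side" == some preferred_side then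
          match st.1 with
          | none => some (item, s)
          | some (m, ms) => if ms < s then some (item, s) else some (m, ms)
        else st.1
      (bp, ba)) (none, none)
  match best.1 with
  | some p => some p.1
  | none =>
    match best.2 with
    | some p => some p.1
    | none => none

-- ===== PRECONDITION & SPEC =====
def Spec_select_target_for_package (package : List (String × List String)) (objectives : List (List (String × String))) (preferred_side : String) (out : Option (List (String × String))) : Prop := out = select_target_for_package_alt package objectives preferred_side
instance (package : List (String × List String)) (objectives : List (List (String × String))) (preferred_side : String) (out : Option (List (String × String))) : Decidable (Spec_select_target_for_package package objectives preferred_side out) := by unfold Spec_select_target_for_package; infer_instance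

-- ===== CLAIM (what is proved, stated in full; the proofs are below) =====
def Claim_equal_select_target_for_package : Prop := ∀ (package : List (String × List String)) (objectives : List (List (String × String))) (preferred_side : String), Dom_select_target_for_package package objectives preferred_side → Spec_select_target_for_package package objectives preferred_side (select_target_for_package package objectives preferred_side)

-- ===== LEMMAS AND PROOFS =====

-- the running-first-max loop on an optional accumulator
def pvRunM {A : Type} (key : A → Int) (st : Option A) (xs : List A) : Option A :=
  xs.foldl (fun st x =>
    match st with
    | none => some x
    | some m => if key m < key x then some x else some m) st

-- A's enumerate fold from index k = B's recursion started at weight max 1 (n - k)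
theorem pv_score_fold_eq (n : Int) (category role name : String) :
    ∀ (ts : List String) (k : Int) (v : Int),
    (PySem.List.enumerate ts k).foldl (fun value p =>
      let index := p.1
      let token := p.2
      let weight : Int := max 1 (n - index)
      if token == "objective" && (category == "objective" || category == "target") then
        value + 10 * weight
      else if token == "high_value_asset" && category == "high_value_asset" then
        value + 10 * weight
      else if token == "corridor_opener" && (PySem.Str.isIn "escort" role || PySem.Str.isIn "support" role || PySem.Str.isIn "hvaa" name) then
        value + 10 * weight
      else if token == "fighter" && (PySem.Str.isIn "fighter" name || (role == "escort" || role == "defense" || role == "intercept" || role == "barrier")) then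
        value + 8 * weight
      else if token == "survival_preserve" && (category == "objective" || category == "target" || category == "high_value_asset") then
        value + 4 * weight
      else value) v
    = v + pvScoreRec ts (max 1 (n - k)) category role name := by
  intro ts
  induction ts with
  | nil => intro k v; simp [PySem.List.enumerate_nil, pvScoreRec]
  | cons t rest ih =>
    intro k v
    rw [PySem.List.enumerate_cons, List.foldl_cons, ih (k + 1), pvScoreRec]
    have hw : max 1 (n - (k + 1)) = max 1 (max 1 (n - k) - 1) := by omega
    rw [← hw]
    clear ih
    split_ifs <;> simp_all
    all_goals try ring
    all_goals (split_ifs <;> simp_all)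

-- the two score functions agree
theorem pv_score_eq (item : List (String × String)) (priorities : List String) :
    pvScoreA item priorities
      = pvScoreRec priorities (priorities.length : Int)
          (PySem.Str.lower (((PySem.Dict.mk item).get? "category").getD ""))
          (PySem.Str.lower (((PySem.Dict.mk item).get? "role").getD ""))
          (PySem.Str.lower (((PySem.Dict.mk item).get? "name").getD "")) := by
  unfold pvScoreA
  rw [pv_score_fold_eq (priorities.length : Int) _ _ _ priorities 0 0]
  cases priorities with
  | nil => simp [pvScoreRec]
  | cons a t =>
    have h : max 1 ((((a :: t).length : Int)) - 0) = ((a :: t).length : Int) := by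
      simp only [List.length_cons]; push_cast; omega
    rw [h, zero_add]

-- head of one insertBy step against a (possibly empty) accumulator = one running-max step
theorem pv_head?_insertBy {A : Type} (key : A → Int) (x : A) (acc : List A) :
    (PySem.List.insertBy (fun a b => decide (key b < key a)) x acc).head?
      = match acc.head? with
        | none => some x
        | some m => if key m < key x then some x else some m := by
  cases acc with
  | nil => rfl
  | cons y ys =>
    simp only [PySem.List.insertBy, List.head?]
    by_cases h : key y < key x <;> simp [h]

-- head of the insertion-sort fold = pvRunM
theorem pv_head?_foldl_insertBy {A : Type} (key : A → Int) (xs : List A) (acc : List A) :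
    (xs.foldl (fun acc x => PySem.List.insertBy (fun a b => decide (key b < key a)) x acc) acc).head?
      = pvRunM key acc.head? xs := by
  induction xs generalizing acc with
  | nil => rfl
  | cons x t ih =>
    simp only [List.foldl_cons, pvRunM] at *
    rw [ih, pv_head?_insertBy]

-- head of the stable descending sort is the first maximal element
theorem pv_head?_sorted_rev_eq_runM {A : Type} (xs : List A) (key : A → Int) :
    (PySem.List.sorted xs key true).head? = pvRunM key none xs := by
  rw [PySem.List.sorted_rev_eq_foldl_insertBy]
  simpa using pv_head?_foldl_insertBy key xs []

-- one running-max step commutes with pairing the item with its score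
theorem pv_step_map (key : List (String × String) → Int) (x : List (String × String))
    (o : Option (List (String × String))) :
    (match o.map (fun y => (y, key y)) with
      | none => some (x, key x)
      | some (m, ms) => if ms < key x then some (x, key x) else some (m, ms))
    = (match o with
        | none => some x
        | some m => if key m < key x then some x else some m).map (fun y => (y, key y)) := by
  cases o with
  | none => rfl
  | some m => by_cases h : key m < key x <;> simp [h]

-- peeling the head off the running-max loop
theorem pvRunM_cons (key : List (String × String) → Int)
    (o : Option (List (String × String))) (x : List (String × String))
    (l : List (List (String × String))) :
    pvRunM key o (x :: l)
      = pvRunM key (match o with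
          | none => some x
          | some m => if key m < key x then some x else some m) l := by
  cases o with
  | none => rfl
  | some m => by_cases h : key m < key x <;> simp [pvRunM, h]

-- B's fused pair fold = (running max over the filtered list, running max over the whole list),
-- with the stored score pinned to the stored item
theorem pv_pair_fold (key : List (String × String) → Int)
    (p : List (String × String) → Bool) :
    ∀ (xs : List (List (String × String)))
      (bp0 ba0 : Option (List (String × String))),
    xs.foldl
      (fun (st : Option (List (String × String) × Int) × Option (List (String × String) × Int)) item =>
        let s := key item
        let ba := match st.2 with
          | none => some (item, s)
          | some (m, ms) => if ms < s then some (item, s) else some (m, ms)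
        let bp := if p item then
            match st.1 with
            | none => some (item, s)
            | some (m, ms) => if ms < s then some (item, s) else some (m, ms)
          else st.1
        (bp, ba))
      (bp0.map (fun x => (x, key x)), ba0.map (fun x => (x, key x)))
    = ((pvRunM key bp0 (xs.filter p)).map (fun x => (x, key x)),
       (pvRunM key ba0 xs).map (fun x => (x, key x))) := by
  intro xs
  induction xs with
  | nil => intro bp0 ba0; rfl
  | cons x t ih =>
    intro bp0 ba0
    have h1 := pv_step_map key x bp0
    have h2 := pv_step_map key x ba0
    by_cases hp : p x
    · simp only [List.foldl_cons, List.filter_cons, if_pos hp, h1, h2, ih]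
      rw [pvRunM_cons key bp0, pvRunM_cons key ba0]
    · simp only [List.foldl_cons, List.filter_cons, if_neg hp, h2, ih]
      rw [pvRunM_cons key ba0]

-- pvRunM from none on a nonempty list is some
theorem pv_runM_ne_none {A : Type} (key : A → Int) (x : A) (t : List A) :
    ∃ m, pvRunM key none (x :: t) = some m := by
  simp only [pvRunM, List.foldl_cons]
  induction t generalizing x with
  | nil => exact ⟨x, rfl⟩
  | cons y ys ih =>
    simp only [List.foldl_cons]
    by_cases h : key x < key y <;> simp [h] <;> [exact ih y; exact ih x]

-- ===== VERDICT (by name: the statement is the Claim_ definition above) =====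
theorem select_target_for_package_spec : Claim_equal_select_target_for_package := by
  intro package objectives preferred_side _
  show select_target_for_package package objectives preferred_side
      = select_target_for_package_alt package objectives preferred_side
  unfold select_target_for_package select_target_for_package_alt
  simp only []
  set priorities := ((PySem.Dict.mk package).get? "target_priority").getD [] with hpri
  set key := fun (item : List (String × String)) =>
    pvScoreRec priorities (priorities.length : Int)
      (PySem.Str.lower (((PySem.Dict.mk item).get? "category").getD ""))
      (PySem.Str.lower (((PySem.Dict.mk item).get? "role").getD ""))
      (PySem.Str.lower (((PySem.Dict.mk item).get? "name").getD "")) with hkey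
  have hks : (fun item => pvScoreA item priorities) = key := by
    funext item; rw [hkey]; exact pv_score_eq item priorities
  set p := fun (item : List (String × String)) => (PySem.Dict.mk item).get? "side" == some preferred_side with hp
  rw [hks]
  have hfold := pv_pair_fold key p objectives none none
  simp only [Option.map_none] at hfold
  rw [hfold]
  by_cases hpe : objectives.filter p = []
  · cases objectives with
    | nil => rfl
    | cons x t =>
      obtain ⟨m, hm⟩ := pv_runM_ne_none key x t
      rw [hpe]
      have h0 : pvRunM key none ([] : List (List (String × String))) = none := rfl
      rw [h0, Option.map_none, hm, Option.map_some]
      rcases hs : PySem.List.sorted (x :: t) key true with _ | ⟨a, rest⟩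
      · exact absurd ((PySem.List.sorted_eq_nil_iff _ _ _).mp hs) (by simp)
      · have hhead : (PySem.List.sorted (x :: t) key true).head? = some m := by
          rw [pv_head?_sorted_rev_eq_runM]; exact hm
        rw [hs] at hhead
        simp only [List.head?, Option.some.injEq] at hhead
        simp [PySem.List.pyGet?, PySem.List.pyIdx?, hs, hhead]
  · rcases hf : objectives.filter p with _ | ⟨x, t⟩
    · exact absurd hf hpe
    · obtain ⟨m, hm⟩ := pv_runM_ne_none key x t
      rw [hm, Option.map_some]
      rcases hs : PySem.List.sorted (x :: t) key true with _ | ⟨a, rest⟩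
      · exact absurd ((PySem.List.sorted_eq_nil_iff _ _ _).mp hs) (by simp)
      · have hhead : (PySem.List.sorted (x :: t) key true).head? = some m := by
          rw [pv_head?_sorted_rev_eq_runM]; exact hm
        rw [hs] at hhead
        simp only [List.head?, Option.some.injEq] at hhead
        simp [PySem.List.pyGet?, PySem.List.pyIdx?, hs, hhead]
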